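-- pv_equiv track=rewrite | github.com/canxue987/HKMayaTools | scripts/tool_间隔减选_1768020777.py | _order_selected_into_sequences
-- ===== SOURCE A (Python) =====
-- def _order_selected_into_sequences(neighbors, selected_indices):
--     """
--     将选中的边在子图中分段并排序，返回 [(seq:list[int], is_closed:bool), ...]
--     - 链：存在端点（度<=1），从端点出发沿邻接遍历
--     - 环：全部度=2，从最小 index 出发绕完；首尾相邻即视为闭环
--     """
--     sel = set(selected_indices)
--     sub_adj = {e: sorted([n for n in neighbors.get(e, []) if n in sel]) for e in sel}
--     degrees = {e: len(sub_adj[e]) for e in sel}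
--     visited = set()
--     results = []
--
--
--     # 链：从端点出发
--     starts = [e for e, d in degrees.items() if d <= 1]
--     for s in sorted(starts):
--         if s in visited:
--             continue
--         seq = [s]
--         visited.add(s)
--         prev = None
--         cur = s
--         while True:
--             nxts = [n for n in sub_adj.get(cur, []) if n != prev and n not in visited]
--             if not nxts:
--                 break
--             nxt = nxts[0]  # sub_adj 已排序，遍历稳定
--             seq.append(nxt)
--             visited.add(nxt)
--             prev, cur = cur, nxt
--         results.append((seq, False))
--
--
--     # 剩余：环或未覆盖的链残段
--     remaining = sorted([e for e in sel if e not in visited])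
--     while remaining:
--         start = remaining[0]
--         seq = [start]
--         visited.add(start)
--         prev = None
--         cur = start
--         while True:
--             nxts = [n for n in sub_adj.get(cur, []) if n != prev and n not in visited]
--             if not nxts:
--                 break
--             nxt = nxts[0]
--             seq.append(nxt)
--             visited.add(nxt)
--             prev, cur = cur, nxt
--         is_closed = seq[0] in sub_adj.get(seq[-1], [])
--         results.append((seq, is_closed))
--         remaining = sorted([e for e in sel if e not in visited])
--
--
--     return results
-- ===== SOURCE B (Python) =====
-- def _order_selected_into_sequences(neighbors, selected_indices):
--     sel = set(selected_indices)
--     order = sorted(sel)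
--     # shrinking graph: adjacency restricted to sel, physically pruned as vertices are consumed
--     live = {e: sorted(n for n in neighbors.get(e, []) if n in sel) for e in order}
--     rev = {}  # reverse index: rev[v] = vertices whose adjacency list mentions v (lists need not be symmetric)
--     for u in order:
--         for v in live[u]:
--             rev.setdefault(v, []).append(u)
--     ends = [e for e in order if len(live[e]) <= 1]  # endpoints by original degree, already sorted
--     alive = dict.fromkeys(order, True)
--
--     def consume(v):
--         # delete v from the graph; return its remaining neighbour list
--         alive[v] = False
--         for u in rev.get(v, []):
--             if u != v:
--                 live[u] = [x for x in live[u] if x != v]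
--         return [x for x in live[v] if x != v]
--
--     def peel(s):
--         seq, nbrs = [s], consume(s)
--         while nbrs:
--             cur = nbrs[0]
--             seq.append(cur)
--             nbrs = consume(cur)
--         return seq
--
--     results = []
--     for s in ends:  # chains first, from endpoints in increasing order
--         if alive[s]:
--             results.append((peel(s), False))
--     for s in order:  # rings / leftovers, in increasing order
--         if alive[s]:
--             seq = peel(s)
--             results.append((seq, seq[0] in neighbors.get(seq[-1], [])))
--     return results
-- ===== Notes on version B (the rewrite author's own statement) =====
-- stated objective: faster
-- what changed: A keeps a growing visited set, filters each vertex's sorted adjacency against it at every step and re-sorts the whole remaining unvisited vertex list before every ring cycle; B instead builds a reverse index once and physically deletes each consumed vertex from the adjacency lists (a shrinking graph), so the walk takes the head of the current list, liveness is one flag lookup, and both phases are single passes over the once-sorted vertex list.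
import Mathlib
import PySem

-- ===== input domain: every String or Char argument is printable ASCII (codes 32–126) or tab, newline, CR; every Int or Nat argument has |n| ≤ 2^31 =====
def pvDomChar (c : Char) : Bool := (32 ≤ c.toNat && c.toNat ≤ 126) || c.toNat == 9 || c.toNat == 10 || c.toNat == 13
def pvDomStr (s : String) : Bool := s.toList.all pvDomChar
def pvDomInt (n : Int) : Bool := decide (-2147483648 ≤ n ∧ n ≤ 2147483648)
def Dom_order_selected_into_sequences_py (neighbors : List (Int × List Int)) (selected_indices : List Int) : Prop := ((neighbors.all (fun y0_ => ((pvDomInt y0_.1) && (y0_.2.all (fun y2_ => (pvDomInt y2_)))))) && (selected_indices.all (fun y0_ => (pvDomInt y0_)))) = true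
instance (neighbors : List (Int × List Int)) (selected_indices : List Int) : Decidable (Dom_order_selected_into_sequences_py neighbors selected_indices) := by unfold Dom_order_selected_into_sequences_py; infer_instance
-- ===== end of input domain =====

-- B replaces A's visited-set bookkeeping (filtering adjacency against a growing visited set and
-- re-sorting the remaining vertices before every ring cycle) by a shrinking graph: a reverse index is
-- built once and each consumed vertex is physically deleted from the adjacency lists, so the walk takes
-- the head of the current list and both phases are single passes over the once-sorted vertex list.
-- Return value only (neither side mutates its arguments).

-- ===== PORT A =====
-- A's inner 'while True' traversal loop (textually identical in A's two phases): fuel-bounded;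
-- fuel = |sel|+1 always suffices, since every iteration either breaks or visits a fresh member of sel.
def pvWalkA (subAdj : PySem.Dict Int (List Int)) : Nat → List Int → PySem.Set Int → Option Int → Int → List Int × PySem.Set Int
  | 0, seq, visited, _, _ => (seq, visited)
  | fuel+1, seq, visited, prev, cur =>
    let nxts := (subAdj.getD cur []).filter (fun n => some n != prev && !(PySem.Set.contains visited n))
    match nxts with
    | [] => (seq, visited)
    | nxt :: _ => pvWalkA subAdj fuel (seq ++ [nxt]) (PySem.Set.add visited nxt) (some cur) nxt

-- A's 'while remaining:' loop: re-sorts the unvisited indices each cycle; fuel-bounded (≤ |sel| cycles).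
def pvPhase2A (subAdj : PySem.Dict Int (List Int)) (sel : List Int) (wf : Nat) : Nat → PySem.Set Int → List (List Int × Bool) → List (List Int × Bool)
  | 0, _, results => results
  | fuel+1, visited, results =>
    match PySem.List.sorted (sel.filter (fun e => !(PySem.Set.contains visited e))) (fun x => x) false with
    | [] => results
    | start :: _ =>
      let r := pvWalkA subAdj wf [start] (PySem.Set.add visited start) none start
      let isClosed := (subAdj.getD (PySem.List.pyGetD r.1 (-1) 0) []).contains (PySem.List.pyGetD r.1 0 0)
      pvPhase2A subAdj sel wf fuel r.2 (results ++ [(r.1, isClosed)])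

def order_selected_into_sequences_py (neighbors : List (Int × List Int)) (selected_indices : List Int) : List (List Int × Bool) :=
  let sel : PySem.Set Int := PySem.Set.ofList selected_indices
  let nb := PySem.Dict.mk neighbors
  -- sub_adj = {e: sorted([n for n in neighbors.get(e, []) if n in sel]) for e in sel}
  let subAdj : PySem.Dict Int (List Int) :=
    sel.foldl (fun d e => d.insert e (PySem.List.sorted ((nb.getD e []).filter (fun n => PySem.Set.contains sel n)) (fun x => x) false)) PySem.Dict.empty
  -- degrees = {e: len(sub_adj[e]) for e in sel}   (e is always a key of sub_adj, so sub_adj[e] = sub_adj.get(e, []))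
  let degrees : PySem.Dict Int Int :=
    sel.foldl (fun d e => d.insert e ((subAdj.getD e []).length : Int)) PySem.Dict.empty
  let starts : List Int := degrees.items.foldl (fun acc p => if p.2 ≤ 1 then acc ++ [p.1] else acc) []
  let wf := sel.length + 1
  -- chains, from sorted endpoints
  let st1 := (PySem.List.sorted starts (fun x => x) false).foldl
    (fun (st : PySem.Set Int × List (List Int × Bool)) s =>
      if PySem.Set.contains st.1 s then st
      else
        let r := pvWalkA subAdj wf [s] (PySem.Set.add st.1 s) none s
        (r.2, st.2 ++ [(r.1, false)]))
    (PySem.Set.empty, [])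
  pvPhase2A subAdj sel wf (sel.length + 1) st1.1 st1.2

-- ===== PORT B =====
-- consume(v): mark v dead, erase v from every adjacency list that mentions it (via the reverse
-- index), return v's own remaining neighbour list.  State = (alive flags, live adjacency).
def pvConsume (rev : PySem.Dict Int (List Int)) (st : PySem.Dict Int Bool × PySem.Dict Int (List Int)) (v : Int) : List Int × PySem.Dict Int Bool × PySem.Dict Int (List Int) :=
  let alive := st.1.insert v false
  let live := (rev.getD v []).foldl
    (fun d u => if u != v then d.insert u ((d.getD u []).filter (fun x => x != v)) else d) st.2
  ((live.getD v []).filter (fun x => x != v), (alive, live))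

-- peel's 'while nbrs:' loop: fuel-bounded (each step consumes a live vertex; |sel|+1 suffices)
def pvPeelB (rev : PySem.Dict Int (List Int)) : Nat → List Int → List Int → PySem.Dict Int Bool × PySem.Dict Int (List Int) → List Int × (PySem.Dict Int Bool × PySem.Dict Int (List Int))
  | 0, seq, _, st => (seq, st)
  | fuel+1, seq, nbrs, st =>
    match nbrs with
    | [] => (seq, st)
    | cur :: _ =>
      let r := pvConsume rev st cur
      pvPeelB rev fuel (seq ++ [cur]) r.1 r.2

def order_selected_into_sequences_py_alt (neighbors : List (Int × List Int)) (selected_indices : List Int) : List (List Int × Bool) :=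
  let sel : PySem.Set Int := PySem.Set.ofList selected_indices
  let order := PySem.List.sorted sel (fun x => x) false
  let nb := PySem.Dict.mk neighbors
  -- live = {e: sorted(n for n in neighbors.get(e, []) if n in sel) for e in order}
  let live0 : PySem.Dict Int (List Int) :=
    order.foldl (fun d e => d.insert e (PySem.List.sorted ((nb.getD e []).filter (fun n => PySem.Set.contains sel n)) (fun x => x) false)) PySem.Dict.empty
  -- rev: for u in order: for v in live[u]: rev.setdefault(v, []).append(u)
  let rev : PySem.Dict Int (List Int) :=
    order.foldl (fun r u => (live0.getD u []).foldl (fun r v => r.insert v (r.getD v [] ++ [u])) r) PySem.Dict.empty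
  -- ends = [e for e in order if len(live[e]) <= 1]
  let ends := order.filter (fun e => decide ((live0.getD e []).length ≤ 1))
  -- alive = dict.fromkeys(order, True)
  let alive0 : PySem.Dict Int Bool := order.foldl (fun d e => d.insert e true) PySem.Dict.empty
  let wf := sel.length + 1
  -- chains first, from endpoints in increasing order
  let st1 := ends.foldl
    (fun (st : (PySem.Dict Int Bool × PySem.Dict Int (List Int)) × List (List Int × Bool)) s =>
      if st.1.1.getD s false then
        let c := pvConsume rev st.1 s
        let r := pvPeelB rev wf [s] c.1 c.2
        (r.2, st.2 ++ [(r.1, false)])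
      else st)
    ((alive0, live0), [])
  -- rings / leftovers, in increasing order
  let st2 := order.foldl
    (fun (st : (PySem.Dict Int Bool × PySem.Dict Int (List Int)) × List (List Int × Bool)) s =>
      if st.1.1.getD s false then
        let c := pvConsume rev st.1 s
        let r := pvPeelB rev wf [s] c.1 c.2
        let isClosed := (nb.getD (PySem.List.pyGetD r.1 (-1) 0) []).contains (PySem.List.pyGetD r.1 0 0)
        (r.2, st.2 ++ [(r.1, isClosed)])
      else st)
    st1
  st2.2

-- ===== PRECONDITION & SPEC =====
def Spec_order_selected_into_sequences_py (neighbors : List (Int × List Int)) (selected_indices : List Int) (out : List (List Int × Bool)) : Prop := out = order_selected_into_sequences_py_alt neighbors selected_indices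
instance (neighbors : List (Int × List Int)) (selected_indices : List Int) (out : List (List Int × Bool)) : Decidable (Spec_order_selected_into_sequences_py neighbors selected_indices out) := by unfold Spec_order_selected_into_sequences_py; infer_instance

-- ===== CLAIM (what is proved, stated in full; the proofs are below) =====
def Claim_equal_order_selected_into_sequences_py : Prop := ∀ (neighbors : List (Int × List Int)) (selected_indices : List Int), Dom_order_selected_into_sequences_py neighbors selected_indices → Spec_order_selected_into_sequences_py neighbors selected_indices (order_selected_into_sequences_py neighbors selected_indices)

-- ===== LEMMAS AND PROOFS =====

-- Proof-layer middle man: A's algorithm with the per-cycle re-sort replaced by single passes over the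
-- sorted vertex list, still driven by a visited SET (the bridge between A's and B's state).
def pvWalkS (adj : PySem.Dict Int (List Int)) : Nat → List Int → PySem.Set Int → Option Int → Int → List Int × PySem.Set Int
  | 0, seq, visited, _, _ => (seq, visited)
  | fuel+1, seq, visited, prev, cur =>
    match (adj.getD cur []).find? (fun n => some n != prev && !(PySem.Set.contains visited n)) with
    | none => (seq, visited)
    | some nxt => pvWalkS adj fuel (seq ++ [nxt]) (PySem.Set.add visited nxt) (some cur) nxt

def pvAbs (neighbors : List (Int × List Int)) (selected_indices : List Int) : List (List Int × Bool) :=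
  let sel : PySem.Set Int := PySem.Set.ofList selected_indices
  let order := PySem.List.sorted sel (fun x => x) false
  let nb := PySem.Dict.mk neighbors
  let adj : PySem.Dict Int (List Int) :=
    order.foldl (fun d e => d.insert e (PySem.List.sorted ((nb.getD e []).filter (fun n => PySem.Set.contains sel n)) (fun x => x) false)) PySem.Dict.empty
  let wf := sel.length + 1
  let st1 := order.foldl
    (fun (st : PySem.Set Int × List (List Int × Bool)) s =>
      if ((adj.getD s []).length : Int) ≤ 1 then
        if PySem.Set.contains st.1 s then st
        else
          let r := pvWalkS adj wf [s] (PySem.Set.add st.1 s) none s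
          (r.2, st.2 ++ [(r.1, false)])
      else st)
    (PySem.Set.empty, [])
  let st2 := order.foldl
    (fun (st : PySem.Set Int × List (List Int × Bool)) e =>
      if PySem.Set.contains st.1 e then st
      else
        let r := pvWalkS adj wf [e] (PySem.Set.add st.1 e) none e
        let isClosed := (adj.getD (PySem.List.pyGetD r.1 (-1) 0) []).contains (PySem.List.pyGetD r.1 0 0)
        (r.2, st.2 ++ [(r.1, isClosed)]))
    st1
  st2.2

-- ---------- part 1: A = pvAbs ----------

theorem getD_foldl_insert_fun {ν : Type} (ks : List Int) (f : Int → ν) (d : PySem.Dict Int ν) (x : Int) (d0 : ν) :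
    (ks.foldl (fun d e => d.insert e (f e)) d).getD x d0 = if x ∈ ks then f x else d.getD x d0 := by
  induction ks generalizing d with
  | nil => simp
  | cons k ks ih =>
    simp only [List.foldl_cons, ih, List.mem_cons]
    by_cases hx : x ∈ ks
    · simp [hx]
    · by_cases hk : x = k <;> simp [hx, hk, PySem.Dict.getD_insert]

-- the two walks agree when the two adjacency dicts agree pointwise
theorem walkA_eq_walkS (dA dB : PySem.Dict Int (List Int)) (h : ∀ x, dA.getD x [] = dB.getD x [])
    (fuel : Nat) : ∀ seq visited prev cur,
    pvWalkA dA fuel seq visited prev cur = pvWalkS dB fuel seq visited prev cur := by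
  induction fuel with
  | zero => intro seq visited prev cur; rfl
  | succ n ih =>
    intro seq visited prev cur
    simp only [pvWalkA, pvWalkS, h cur, ← List.head?_filter]
    cases hf : ((dB.getD cur []).filter (fun n => some n != prev && !(PySem.Set.contains visited n))) with
    | nil => simp
    | cons nxt t => simp [ih]

-- the walk only grows the visited set
theorem walk_visited_subset (dA : PySem.Dict Int (List Int)) (fuel : Nat) :
    ∀ seq visited prev cur x, x ∈ visited → x ∈ (pvWalkA dA fuel seq visited prev cur).2 := by
  induction fuel with
  | zero => intro _ _ _ _ _ hx; exact hx
  | succ n ih =>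
    intro seq visited prev cur x hx
    simp only [pvWalkA]
    cases hf : ((dA.getD cur []).filter (fun n => some n != prev && !(PySem.Set.contains visited n))) with
    | nil => exact hx
    | cons nxt t => exact ih _ _ _ _ x (by simp [PySem.Set.mem_add, hx])

-- sorting commutes with filtering on a list without duplicates
theorem sorted_filter_comm (l : List Int) (hnd : l.Nodup) (p : Int → Bool) :
    PySem.List.sorted (l.filter p) (fun x => x) false = (PySem.List.sorted l (fun x => x) false).filter p := by
  apply PySem.List.sorted_eq_of_perm_of_pairwise_lt
  · exact (PySem.List.sorted_perm l _ _).filter p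
  · have hlt : (PySem.List.sorted l (fun x => x) false).Pairwise (· < ·) := by
      have h1 := PySem.List.sorted_pairwise (xs := l) (key := fun x => x)
      have h2 : (PySem.List.sorted l (fun x => x) false).Nodup :=
        ((PySem.List.sorted_perm l _ _).nodup_iff).mpr hnd
      exact (h1.and h2).imp (fun h => lt_of_le_of_ne h.1 h.2)
    exact hlt.filter p

-- filtering by the stronger predicate "not in the larger visited set" factors through the smaller one
theorem filter_not_vis_mono (l : List Int) (v v' : PySem.Set Int) (hsub : ∀ x, x ∈ v → x ∈ v') :
    l.filter (fun e => !(PySem.Set.contains v' e)) =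
      (l.filter (fun e => !(PySem.Set.contains v e))).filter (fun e => !(PySem.Set.contains v' e)) := by
  rw [List.filter_filter]
  apply List.filter_congr
  intro x _
  by_cases hx : x ∈ v'
  · simp [hx]
  · have hxv : x ∉ v := fun h => hx (hsub x h)
    simp [hx, hxv]

-- A's phase-2 fueled min-extraction loop equals a single fold over the sorted agenda
theorem phase2_eq (dA dB : PySem.Dict Int (List Int)) (hd : ∀ x, dA.getD x [] = dB.getD x [])
    (sel : List Int) (hnd : sel.Nodup) (wf : Nat) :
    ∀ (rest : List Int) (fuel : Nat) (visited : PySem.Set Int) (results : List (List Int × Bool)),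
    PySem.List.sorted (sel.filter (fun e => !(PySem.Set.contains visited e))) (fun x => x) false
      = rest.filter (fun e => !(PySem.Set.contains visited e)) →
    (sel.filter (fun e => !(PySem.Set.contains visited e))).length < fuel →
    pvPhase2A dA sel wf fuel visited results =
      (rest.foldl (fun (st : PySem.Set Int × List (List Int × Bool)) e =>
        if PySem.Set.contains st.1 e then st
        else
          let r := pvWalkS dB wf [e] (PySem.Set.add st.1 e) none e
          let isClosed := (dB.getD (PySem.List.pyGetD r.1 (-1) 0) []).contains (PySem.List.pyGetD r.1 0 0)
          (r.2, st.2 ++ [(r.1, isClosed)])) (visited, results)).2 := by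
  intro rest
  induction rest with
  | nil =>
    intro fuel visited results hinv hfuel
    obtain ⟨n, rfl⟩ : ∃ n, fuel = n + 1 := ⟨fuel - 1, by omega⟩
    simp only [List.filter_nil] at hinv
    simp only [pvPhase2A]
    rw [hinv]
    rfl
  | cons e rest ih =>
    intro fuel visited results hinv hfuel
    obtain ⟨n, rfl⟩ : ∃ n, fuel = n + 1 := ⟨fuel - 1, by omega⟩
    by_cases hvis : e ∈ visited
    · have hb : PySem.Set.contains visited e = true := by
        rw [PySem.Set.contains_iff]; exact hvis
      rw [List.foldl_cons]
      simp only [hb, if_true]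
      apply ih _ visited results _ hfuel
      rwa [List.filter_cons_of_neg (by simpa using hvis)] at hinv
    · have hb : PySem.Set.contains visited e = false := by
        cases hcb : PySem.Set.contains visited e
        · rfl
        · exact absurd ((PySem.Set.contains_iff _ _).mp hcb) hvis
      have hinv' : PySem.List.sorted (sel.filter (fun e => !(PySem.Set.contains visited e))) (fun x => x) false
          = e :: rest.filter (fun e => !(PySem.Set.contains visited e)) := by
        rwa [List.filter_cons_of_pos (by simpa using hvis)] at hinv
      rw [List.foldl_cons]
      simp only [hb, pvPhase2A, hinv']
      rw [walkA_eq_walkS dA dB hd wf [e] (PySem.Set.add visited e) none e]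
      set r := pvWalkS dB wf [e] (PySem.Set.add visited e) none e with hr
      simp only [hd]
      have hsub : ∀ x, x ∈ visited → x ∈ r.2 := by
        intro x hx
        rw [hr, ← walkA_eq_walkS dA dB hd]
        exact walk_visited_subset dA wf [e] (PySem.Set.add visited e) none e x (by simp [PySem.Set.mem_add, hx])
      have he : e ∈ r.2 := by
        rw [hr, ← walkA_eq_walkS dA dB hd]
        exact walk_visited_subset dA wf [e] (PySem.Set.add visited e) none e e (by simp [PySem.Set.mem_add])
      have hfac := filter_not_vis_mono (sel.filter (fun x => !(PySem.Set.contains visited x))) visited r.2 hsub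
      rw [List.filter_filter] at hfac
      have hcongr : sel.filter (fun e => !(PySem.Set.contains r.2 e)) =
          (sel.filter (fun x => !(PySem.Set.contains visited x))).filter (fun e => !(PySem.Set.contains r.2 e)) := by
        rw [List.filter_filter, List.filter_congr]
        intro x _
        by_cases hx : x ∈ r.2
        · simp [hx]
        · have : x ∉ visited := fun h => hx (hsub x h)
          simp [hx, this]
      have hinv'' : (PySem.List.sorted sel (fun x => x) false).filter (fun e => !(PySem.Set.contains visited e))
          = e :: rest.filter (fun e => !(PySem.Set.contains visited e)) := by
        rwa [sorted_filter_comm sel hnd] at hinv'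
      have hinv2 : PySem.List.sorted (sel.filter (fun e => !(PySem.Set.contains r.2 e))) (fun x => x) false
          = rest.filter (fun e => !(PySem.Set.contains r.2 e)) := by
        rw [sorted_filter_comm sel hnd,
            filter_not_vis_mono (PySem.List.sorted sel (fun x => x) false) visited r.2 hsub,
            hinv'', List.filter_cons_of_neg (by simpa using he),
            ← filter_not_vis_mono rest visited r.2 hsub]
      have hlen : (sel.filter (fun e => !(PySem.Set.contains r.2 e))).length <
          (sel.filter (fun e => !(PySem.Set.contains visited e))).length := by
        have hsubl : (sel.filter (fun e => !(PySem.Set.contains r.2 e))).Sublist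
            (sel.filter (fun e => !(PySem.Set.contains visited e))) := by
          rw [hcongr]
          exact List.filter_sublist
        rcases Nat.lt_or_ge (sel.filter (fun e => !(PySem.Set.contains r.2 e))).length
            (sel.filter (fun e => !(PySem.Set.contains visited e))).length with h | h
        · exact h
        · exfalso
          have heq := hsubl.eq_of_length (Nat.le_antisymm hsubl.length_le h)
          have hemem : e ∈ sel.filter (fun e => !(PySem.Set.contains visited e)) := by
            have : e ∈ PySem.List.sorted (sel.filter (fun e => !(PySem.Set.contains visited e))) (fun x => x) false := by
              rw [hinv']; exact List.mem_cons_self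
            exact (PySem.List.mem_sorted _ _ _ _).mp this
          rw [← heq] at hemem
          have := List.of_mem_filter hemem
          simp at this
          exact this he
      exact ih n r.2 (results ++ [(r.1, (dB.getD (PySem.List.pyGetD r.1 (-1) 0) []).contains (PySem.List.pyGetD r.1 0 0))]) hinv2 (by omega)

theorem a_eq_abs (neighbors : List (Int × List Int)) (selected_indices : List Int) :
    order_selected_into_sequences_py neighbors selected_indices = pvAbs neighbors selected_indices := by
  simp only [order_selected_into_sequences_py, pvAbs]
  have hnd0 : (PySem.Set.ofList selected_indices).Nodup := PySem.Set.nodup_ofList _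
  generalize hsel : PySem.Set.ofList selected_indices = sel at *
  set dA := List.foldl (fun (d : PySem.Dict Int (List Int)) e => d.insert e (PySem.List.sorted (((PySem.Dict.mk neighbors).getD e []).filter (fun n => PySem.Set.contains sel n)) (fun x => x) false)) PySem.Dict.empty sel with hdA
  set dB := List.foldl (fun (d : PySem.Dict Int (List Int)) e => d.insert e (PySem.List.sorted (((PySem.Dict.mk neighbors).getD e []).filter (fun n => PySem.Set.contains sel n)) (fun x => x) false)) PySem.Dict.empty (PySem.List.sorted sel (fun x => x) false) with hdB
  have hd : ∀ x, PySem.Dict.getD dA x [] = PySem.Dict.getD dB x [] := by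
    intro x
    rw [hdA, hdB, getD_foldl_insert_fun, getD_foldl_insert_fun]
    by_cases hx : x ∈ sel
    · rw [if_pos hx, if_pos ((PySem.List.mem_sorted _ _ _ _).mpr hx)]
    · rw [if_neg hx, if_neg (fun h => hx ((PySem.List.mem_sorted _ _ _ _).mp h))]
  have hitems := PySem.Dict.items_foldl_insert_fresh sel (fun e => e)
    (fun e => ((PySem.Dict.getD dA e []).length : Int)) PySem.Dict.empty
    (by intro a _; simp) (by simpa using hnd0)
  simp at hitems
  rw [hitems]
  simp only [show (PySem.Dict.empty : PySem.Dict Int Int).items = [] from rfl, List.nil_append]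
  rw [PySem.List.foldl_append_ite (p := fun p : Int × Int => p.2 ≤ 1) (f := fun p : Int × Int => p.1),
      List.filter_map, List.map_map]
  simp only [Function.comp_def, List.nil_append, List.map_id']
  rw [sorted_filter_comm sel hnd0]
  rw [PySem.List.foldl_ite_eq_foldl_filter (p := fun s : Int => ((PySem.Dict.getD dB s []).length : Int) ≤ 1)]
  have hpred : (fun x : Int => decide (((PySem.Dict.getD dA x []).length : Int) ≤ 1)) = (fun x : Int => decide (((PySem.Dict.getD dB x []).length : Int) ≤ 1)) := by
    funext e; rw [hd e]
  rw [hpred]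
  have hbody : (fun (st : PySem.Set Int × List (List Int × Bool)) s =>
      if PySem.Set.contains st.1 s = true then st
      else
        ((pvWalkA dA (List.length sel + 1) [s] (PySem.Set.add st.1 s) none s).2,
          st.2 ++ [((pvWalkA dA (List.length sel + 1) [s] (PySem.Set.add st.1 s) none s).1, false)]))
      = (fun (st : PySem.Set Int × List (List Int × Bool)) s =>
      if PySem.Set.contains st.1 s = true then st
      else
        ((pvWalkS dB (List.length sel + 1) [s] (PySem.Set.add st.1 s) none s).2,
          st.2 ++ [((pvWalkS dB (List.length sel + 1) [s] (PySem.Set.add st.1 s) none s).1, false)])) := by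
    funext st s
    by_cases hc : PySem.Set.contains st.1 s = true
    · rw [if_pos hc, if_pos hc]
    · rw [if_neg hc, if_neg hc, walkA_eq_walkS dA dB hd]
  rw [hbody]
  exact phase2_eq dA dB hd sel hnd0 (List.length sel + 1)
    (PySem.List.sorted sel (fun x => x) false) (List.length sel + 1) _ _
    (sorted_filter_comm sel hnd0 _)
    (Nat.lt_succ_of_le (List.length_filter_le _ _))

-- ---------- part 2: pvAbs = B ----------
-- Simulation invariant between the abstract visited SET and B's (alive flags, pruned adjacency):
-- alive[x] ↔ x is a selected vertex not yet visited, and for such x the pruned list is exactly the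
-- initial list filtered of visited vertices.
def pvInv (order : List Int) (live0 : PySem.Dict Int (List Int)) (vis : PySem.Set Int)
    (alive : PySem.Dict Int Bool) (live : PySem.Dict Int (List Int)) : Prop :=
  (∀ x, alive.getD x false = (decide (x ∈ order) && !(PySem.Set.contains vis x))) ∧
  (∀ x, x ∈ order → x ∉ vis → live.getD x [] = (live0.getD x []).filter (fun n => !(PySem.Set.contains vis n)))

theorem contains_add_eq (s : PySem.Set Int) (x v : Int) :
    (PySem.Set.add s v).contains x = (decide (x = v) || s.contains x) := by
  simp only [PySem.Set.contains, PySem.Set.add, List.contains_eq_mem]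
  split_ifs with h
  · by_cases hx : x = v <;> simp [hx, h]
  · simp [List.mem_append, or_comm]

-- effect of B's pruning loop 'for u in rev[v]: if u != v: live[u] = [x for x in live[u] if x != v]'
theorem prune_foldl (us : List Int) (v : Int) (d : PySem.Dict Int (List Int)) (x : Int) :
    (us.foldl (fun d u => if u != v then d.insert u ((d.getD u []).filter (fun y => y != v)) else d) d).getD x []
      = if x ∈ us ∧ x ≠ v then (d.getD x []).filter (fun y => y != v) else d.getD x [] := by
  induction us generalizing d with
  | nil => simp
  | cons u us ih =>
    simp only [List.foldl_cons]
    by_cases huv : u = v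
    · simp only [huv, bne_self_eq_false, Bool.false_eq_true, if_false, ih, List.mem_cons]
      by_cases hx : x ∈ us ∧ x ≠ v
      · simp [hx]
      · rw [if_neg hx, if_neg (by tauto)]
    · rw [if_pos (by simpa using huv)]
      rw [ih]
      rw [PySem.Dict.getD_insert]
      by_cases hxu : x = u
      · subst hxu
        by_cases hx : x ∈ us
        · simp [hx, huv, List.filter_filter]
        · simp [hx, huv]
      · simp only [if_neg hxu]
        by_cases hx : x ∈ us ∧ x ≠ v
        · simp [hx]
        · rw [if_neg hx, if_neg (by simp only [List.mem_cons]; tauto)]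

-- membership in the reverse index built by the nested loop
theorem rev_inner_mem (l : List Int) (u : Int) (r : PySem.Dict Int (List Int)) (w y : Int) :
    w ∈ (l.foldl (fun r v => r.insert v (r.getD v [] ++ [u])) r).getD y [] ↔
      w ∈ r.getD y [] ∨ (w = u ∧ y ∈ l) := by
  induction l generalizing r with
  | nil => simp
  | cons v l ih =>
    simp only [List.foldl_cons, ih, PySem.Dict.getD_insert, List.mem_cons]
    by_cases hy : y = v
    · subst hy
      simp only [if_true, List.mem_append, List.mem_singleton]
      tauto
    · simp [hy]

theorem rev_mem (live0 : PySem.Dict Int (List Int)) (us : List Int) (r : PySem.Dict Int (List Int)) (w y : Int) :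
    w ∈ (us.foldl (fun r u => (live0.getD u []).foldl (fun r v => r.insert v (r.getD v [] ++ [u])) r) r).getD y [] ↔
      w ∈ r.getD y [] ∨ (w ∈ us ∧ y ∈ live0.getD w []) := by
  induction us generalizing r with
  | nil => simp
  | cons u us ih =>
    simp only [List.foldl_cons, ih, rev_inner_mem, List.mem_cons]
    constructor
    · rintro ((h | ⟨rfl, h⟩) | h) <;> tauto
    · rintro (h | ⟨(rfl | h1), h2⟩) <;> tauto

-- consume(v) on a state simulating visited set 'vis' simulates 'vis.add v'
theorem consume_sim (order : List Int) (live0 rev : PySem.Dict Int (List Int))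
    (hrev : ∀ u v, u ∈ rev.getD v [] ↔ (u ∈ order ∧ v ∈ live0.getD u []))
    (vis : PySem.Set Int) (alive : PySem.Dict Int Bool) (live : PySem.Dict Int (List Int)) (v : Int)
    (hInv : pvInv order live0 vis alive live) (hvo : v ∈ order) (hvv : v ∉ vis) :
    (pvConsume rev (alive, live) v).1
        = (live0.getD v []).filter (fun n => !(PySem.Set.contains (PySem.Set.add vis v) n)) ∧
      pvInv order live0 (PySem.Set.add vis v) (pvConsume rev (alive, live) v).2.1 (pvConsume rev (alive, live) v).2.2 := by
  obtain ⟨hA, hL⟩ := hInv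
  have hnewpred : ∀ (l : List Int),
      (l.filter (fun n => !(PySem.Set.contains vis n))).filter (fun y => y != v)
        = l.filter (fun n => !(PySem.Set.contains (PySem.Set.add vis v) n)) := by
    intro l
    rw [List.filter_filter]
    apply List.filter_congr
    intro n _
    rw [contains_add_eq]
    by_cases hn : n = v <;> by_cases hnv : n ∈ vis <;>
      simp [hn, hnv, bne]
  have hlive : ∀ x, (pvConsume rev (alive, live) v).2.2.getD x []
      = if x ∈ rev.getD v [] ∧ x ≠ v then (live.getD x []).filter (fun y => y != v) else live.getD x [] := by
    intro x
    simp only [pvConsume]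
    exact prune_foldl _ _ _ _
  refine ⟨?_, ?_, ?_⟩
  · -- returned neighbour list
    simp only [pvConsume]
    rw [prune_foldl]
    have : ¬ (v ∈ rev.getD v [] ∧ v ≠ v) := by simp
    rw [if_neg this, hL v hvo hvv, hnewpred]
  · -- alive flags
    intro x
    simp only [pvConsume, PySem.Dict.getD_insert]
    by_cases hx : x = v
    · subst hx
      simp
    · rw [if_neg hx, hA x, contains_add_eq]
      simp [hx]
  · -- pruned adjacency
    intro x hxo hxv
    rw [PySem.Set.mem_add] at hxv
    rw [not_or] at hxv
    obtain ⟨hxv', hxvis⟩ := And.intro hxv.2 hxv.1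
    rw [hlive x]
    by_cases hxr : x ∈ rev.getD v []
    · rw [if_pos ⟨hxr, hxv'⟩, hL x hxo hxvis, hnewpred]
    · rw [if_neg (by tauto), hL x hxo hxvis]
      have hvnot : v ∉ live0.getD x [] := fun h => hxr ((hrev x v).mpr ⟨hxo, h⟩)
      apply List.filter_congr
      intro n hn
      rw [contains_add_eq]
      have : n ≠ v := fun h => hvnot (h ▸ hn)
      simp [this]
-- step functions of the two phase loops (proof-layer names for the fold bodies)
def pvStepS (adj : PySem.Dict Int (List Int)) (wf : Nat) (flag : List Int → Bool) :
    PySem.Set Int × List (List Int × Bool) → Int → PySem.Set Int × List (List Int × Bool) :=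
  fun st s =>
    if PySem.Set.contains st.1 s then st
    else
      let r := pvWalkS adj wf [s] (PySem.Set.add st.1 s) none s
      (r.2, st.2 ++ [(r.1, flag r.1)])

def pvStepB (rev : PySem.Dict Int (List Int)) (wf : Nat) (flag : List Int → Bool) :
    (PySem.Dict Int Bool × PySem.Dict Int (List Int)) × List (List Int × Bool) → Int →
      (PySem.Dict Int Bool × PySem.Dict Int (List Int)) × List (List Int × Bool) :=
  fun st s =>
    if st.1.1.getD s false then
      let c := pvConsume rev st.1 s
      let r := pvPeelB rev wf [s] c.1 c.2
      (r.2, st.2 ++ [(r.1, flag r.1)])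
    else st

-- the peel loop simulates the set-based walk
theorem walk_sim (order : List Int) (live0 rev : PySem.Dict Int (List Int))
    (hrev : ∀ u v, u ∈ rev.getD v [] ↔ (u ∈ order ∧ v ∈ live0.getD u []))
    (hadj : ∀ x n, n ∈ live0.getD x [] → n ∈ order) :
    ∀ (fuel : Nat) (seq nbrs : List Int) (vis : PySem.Set Int) (alive : PySem.Dict Int Bool)
      (live : PySem.Dict Int (List Int)) (prev : Option Int) (cur : Int),
    pvInv order live0 vis alive live →
    (∀ p, prev = some p → p ∈ vis) →
    nbrs = (live0.getD cur []).filter (fun n => !(PySem.Set.contains vis n)) →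
    cur ∈ vis →
    (pvPeelB rev fuel seq nbrs (alive, live)).1 = (pvWalkS live0 fuel seq vis prev cur).1 ∧
      pvInv order live0 (pvWalkS live0 fuel seq vis prev cur).2
        (pvPeelB rev fuel seq nbrs (alive, live)).2.1 (pvPeelB rev fuel seq nbrs (alive, live)).2.2 := by
  intro fuel
  induction fuel with
  | zero => intro seq nbrs vis alive live prev cur hInv _ _ _; exact ⟨rfl, hInv⟩
  | succ n ih =>
    intro seq nbrs vis alive live prev cur hInv hprev hnbrs hcur
    have hfind : (live0.getD cur []).find? (fun m => some m != prev && !(PySem.Set.contains vis m))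
        = nbrs.head? := by
      rw [hnbrs, List.head?_filter]
      congr 1
      funext m
      cases prev with
      | none => simp
      | some p =>
        by_cases hm : m = p
        · subst hm
          have hct : PySem.Set.contains vis m = true := (PySem.Set.contains_iff _ _).mpr (hprev m rfl)
          simp only [bne_self_eq_false, Bool.false_and, hct, Bool.not_true]
        · simp [hm]
    simp only [pvWalkS, pvPeelB, hfind]
    cases hnb : nbrs with
    | nil => simp only [List.head?_nil]; exact ⟨trivial, hInv⟩
    | cons nxt rest =>
      simp only [List.head?_cons]
      have hmemf : nxt ∈ (live0.getD cur []).filter (fun n => !(PySem.Set.contains vis n)) := by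
        rw [← hnbrs, hnb]; exact List.mem_cons_self
      have hnxtord : nxt ∈ order := hadj cur nxt (List.mem_of_mem_filter hmemf)
      have hnxtvis : nxt ∉ vis := by
        have hb := List.of_mem_filter hmemf
        intro hmem
        rw [(PySem.Set.contains_iff _ _).mpr hmem] at hb
        exact absurd hb (by simp)
      obtain ⟨hret, hInv'⟩ := consume_sim order live0 rev hrev vis alive live nxt hInv hnxtord hnxtvis
      have hcur' : cur ∈ PySem.Set.add vis nxt := by simp [PySem.Set.mem_add, hcur]
      have := ih (seq ++ [nxt]) (pvConsume rev (alive, live) nxt).1 (PySem.Set.add vis nxt)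
        (pvConsume rev (alive, live) nxt).2.1 (pvConsume rev (alive, live) nxt).2.2 (some cur) nxt
        hInv' (by rintro p hp; cases hp; exact hcur') hret
        (by simp [PySem.Set.mem_add])
      simpa using this

-- the set-based walk only appends vertices of the selected subgraph
theorem walkS_shape (order : List Int) (adj : PySem.Dict Int (List Int))
    (hadj : ∀ x n, n ∈ adj.getD x [] → n ∈ order) :
    ∀ (fuel : Nat) (seq : List Int) (vis : PySem.Set Int) (prev : Option Int) (cur : Int),
    ∃ t, (pvWalkS adj fuel seq vis prev cur).1 = seq ++ t ∧ ∀ x ∈ t, x ∈ order := by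
  intro fuel
  induction fuel with
  | zero => intro seq vis prev cur; exact ⟨[], by simp [pvWalkS]⟩
  | succ n ih =>
    intro seq vis prev cur
    simp only [pvWalkS]
    cases hf : (adj.getD cur []).find? (fun m => some m != prev && !(PySem.Set.contains vis m)) with
    | none => exact ⟨[], by simp⟩
    | some nxt =>
      obtain ⟨t, ht, hm⟩ := ih (seq ++ [nxt]) (PySem.Set.add vis nxt) (some cur) nxt
      refine ⟨nxt :: t, by simp [ht], ?_⟩
      intro x hx
      rcases List.mem_cons.mp hx with rfl | hx
      · exact hadj cur x (List.mem_of_find?_eq_some hf)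
      · exact hm x hx

-- first and last element of a nonempty list, as Python's l[0] and l[-1]
theorem pyGetD_zero_mem (l : List Int) (h : l ≠ []) : PySem.List.pyGetD l 0 0 ∈ l := by
  cases l with
  | nil => exact absurd rfl h
  | cons x t => simp [PySem.List.pyGetD_zero_cons]

theorem pyGetD_neg_one_mem (l : List Int) (h : l ≠ []) : PySem.List.pyGetD l (-1) 0 ∈ l := by
  have hgl : PySem.List.pyGetD l (-1) 0 = l.getLast h := by
    simp only [PySem.List.pyGetD, PySem.List.pyGet?, PySem.List.pyIdx?]
    have hl : (1:Int) ≤ (l.length:Int) := by cases l <;> simp_all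
    rw [if_neg (by omega), if_pos (by omega)]
    have hlt : l.length - (-(-1:Int)).toNat < l.length := by cases l <;> simp_all
    simp only [Option.bind_some]
    rw [List.getElem?_eq_getElem hlt]
    simp [List.getLast_eq_getElem]
  rw [hgl]
  exact List.getLast_mem h

-- both phase loops simulate each other, step function against step function
theorem fold_sim (order : List Int) (live0 rev : PySem.Dict Int (List Int))
    (hrev : ∀ u v, u ∈ rev.getD v [] ↔ (u ∈ order ∧ v ∈ live0.getD u []))
    (hadj : ∀ x n, n ∈ live0.getD x [] → n ∈ order) (wf : Nat)
    (flagA flagB : List Int → Bool)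
    (hflag : ∀ l : List Int, (∀ x ∈ l, x ∈ order) → l ≠ [] → flagA l = flagB l) :
    ∀ (l : List Int), (∀ s ∈ l, s ∈ order) →
    ∀ (vis : PySem.Set Int) (alive : PySem.Dict Int Bool) (live : PySem.Dict Int (List Int))
      (res : List (List Int × Bool)),
    pvInv order live0 vis alive live →
    (l.foldl (pvStepS live0 wf flagA) (vis, res)).2
        = (l.foldl (pvStepB rev wf flagB) ((alive, live), res)).2 ∧
      pvInv order live0 (l.foldl (pvStepS live0 wf flagA) (vis, res)).1
        (l.foldl (pvStepB rev wf flagB) ((alive, live), res)).1.1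
        (l.foldl (pvStepB rev wf flagB) ((alive, live), res)).1.2 := by
  intro l
  induction l with
  | nil => intro _ vis alive live res hInv; exact ⟨rfl, hInv⟩
  | cons s l ih =>
    intro hl vis alive live res hInv
    have hso : s ∈ order := hl s List.mem_cons_self
    have hl' : ∀ x ∈ l, x ∈ order := fun x hx => hl x (List.mem_cons_of_mem _ hx)
    have hguard : alive.getD s false = !(PySem.Set.contains vis s) := by
      rw [hInv.1 s]
      simp [hso]
    simp only [List.foldl_cons, pvStepS, pvStepB, hguard]
    by_cases hv : s ∈ vis
    · rw [if_pos ((PySem.Set.contains_iff _ _).mpr hv)]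
      rw [(PySem.Set.contains_iff _ _).mpr hv]
      simp only [Bool.not_true, Bool.false_eq_true, if_false]
      exact ih hl' vis alive live res hInv
    · have hc : PySem.Set.contains vis s = false := by
        cases hcb : PySem.Set.contains vis s
        · rfl
        · exact absurd ((PySem.Set.contains_iff _ _).mp hcb) hv
      rw [hc]
      simp only [Bool.not_false, if_true, Bool.false_eq_true, if_false]
      obtain ⟨hret, hInv'⟩ := consume_sim order live0 rev hrev vis alive live s hInv hso hv
      obtain ⟨hseq, hInv''⟩ := walk_sim order live0 rev hrev hadj wf [s]
        (pvConsume rev (alive, live) s).1 (PySem.Set.add vis s)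
        (pvConsume rev (alive, live) s).2.1 (pvConsume rev (alive, live) s).2.2 none s
        hInv' (by intro p hp; cases hp) hret (by simp [PySem.Set.mem_add])
      obtain ⟨t, ht, hmem⟩ := walkS_shape order live0 hadj wf [s] (PySem.Set.add vis s) none s
      have hflageq : flagA (pvWalkS live0 wf [s] (PySem.Set.add vis s) none s).1
          = flagB (pvWalkS live0 wf [s] (PySem.Set.add vis s) none s).1 := by
        apply hflag
        · intro x hx
          rw [ht] at hx
          rcases List.mem_append.mp hx with hx | hx
          · rw [List.mem_singleton.mp hx]; exact hso
          · exact hmem x hx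
        · rw [ht]; simp
      rw [Prod.mk.eta] at hseq hInv''
      have hih := ih hl' (pvWalkS live0 wf [s] (PySem.Set.add vis s) none s).2
        (pvPeelB rev wf [s] (pvConsume rev (alive, live) s).1 (pvConsume rev (alive, live) s).2).2.1
        (pvPeelB rev wf [s] (pvConsume rev (alive, live) s).1 (pvConsume rev (alive, live) s).2).2.2
        (res ++ [((pvWalkS live0 wf [s] (PySem.Set.add vis s) none s).1,
          flagA (pvWalkS live0 wf [s] (PySem.Set.add vis s) none s).1)])
        hInv''
      rw [Prod.mk.eta] at hih
      rw [hseq, ← hflageq]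
      exact hih

-- the closed-ring test, parametrized by the adjacency it reads (pvAbs reads the filtered
-- sorted sub-adjacency, B reads the raw neighbour dict)
def pvFlagAdj (adj : PySem.Dict Int (List Int)) : List Int → Bool :=
  fun q => (adj.getD (PySem.List.pyGetD q (-1) 0) []).contains (PySem.List.pyGetD q 0 0)

theorem abs_eq_alt (neighbors : List (Int × List Int)) (selected_indices : List Int) :
    pvAbs neighbors selected_indices = order_selected_into_sequences_py_alt neighbors selected_indices := by
  simp only [pvAbs, order_selected_into_sequences_py_alt]
  generalize hsel : PySem.Set.ofList selected_indices = sel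
  set order := PySem.List.sorted sel (fun x => x) false with horder
  set nb := PySem.Dict.mk neighbors with hnbdef
  set live0 := List.foldl (fun (d : PySem.Dict Int (List Int)) e => d.insert e (PySem.List.sorted ((nb.getD e []).filter (fun n => PySem.Set.contains sel n)) (fun x => x) false)) PySem.Dict.empty order with hlive0
  set rev := List.foldl (fun (r : PySem.Dict Int (List Int)) u => (live0.getD u []).foldl (fun r v => r.insert v (r.getD v [] ++ [u])) r) PySem.Dict.empty order with hrevdef
  set alive0 := List.foldl (fun (d : PySem.Dict Int Bool) e => d.insert e true) PySem.Dict.empty order with halive0def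
  have hlive0D : ∀ x, live0.getD x [] = if x ∈ order then PySem.List.sorted ((nb.getD x []).filter (fun n => PySem.Set.contains sel n)) (fun x => x) false else [] := by
    intro x
    rw [hlive0, getD_foldl_insert_fun]
    by_cases hx : x ∈ order <;> simp [hx]
  have hrev : ∀ u v, u ∈ rev.getD v [] ↔ (u ∈ order ∧ v ∈ live0.getD u []) := by
    intro u v
    rw [hrevdef, rev_mem]
    simp
  have hadj : ∀ x n, n ∈ live0.getD x [] → n ∈ order := by
    intro x n hn
    rw [hlive0D x] at hn
    by_cases hx : x ∈ order
    · rw [if_pos hx] at hn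
      have hmem := List.mem_filter.mp ((PySem.List.mem_sorted _ _ _ _).mp hn)
      exact (PySem.List.mem_sorted _ _ _ _).mpr ((PySem.Set.contains_iff _ _).mp hmem.2)
    · rw [if_neg hx] at hn
      simp at hn
  have hInv0 : pvInv order live0 PySem.Set.empty alive0 live0 := by
    unfold pvInv
    constructor
    · intro x
      have h := getD_foldl_insert_fun order (fun (_ : Int) => true) PySem.Dict.empty x false
      rw [show alive0.getD x false = if x ∈ order then true else PySem.Dict.getD PySem.Dict.empty x false from h]
      by_cases hx : x ∈ order <;> simp [hx]
    · intro x _ _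
      simp
  have hends' : order.filter (fun s => decide (((live0.getD s []).length : Int) ≤ 1))
      = order.filter (fun e => decide ((live0.getD e []).length ≤ 1)) := by
    apply List.filter_congr
    intro x _
    rw [decide_eq_decide]
    exact_mod_cast Iff.rfl
  have hflag2 : ∀ l : List Int, (∀ x ∈ l, x ∈ order) → l ≠ [] →
      pvFlagAdj live0 l = pvFlagAdj nb l := by
    intro l hl hne
    have hLo : PySem.List.pyGetD l (-1) 0 ∈ order := hl _ (pyGetD_neg_one_mem l hne)
    have hso : PySem.List.pyGetD l 0 0 ∈ order := hl _ (pyGetD_zero_mem l hne)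
    have hcs : PySem.Set.contains sel (PySem.List.pyGetD l 0 0) = true :=
      (PySem.Set.contains_iff _ _).mpr ((PySem.List.mem_sorted _ _ _ _).mp hso)
    simp only [pvFlagAdj]
    rw [hlive0D, if_pos hLo]
    simp only [List.contains_eq_mem]
    rw [decide_eq_decide]
    simp only [PySem.List.mem_sorted, List.mem_filter, and_iff_left_iff_imp]
    exact fun _ => hcs
  show (order.foldl (pvStepS live0 (sel.length + 1) (pvFlagAdj live0))
          (order.foldl (fun st s => if ((live0.getD s []).length : Int) ≤ 1 then pvStepS live0 (sel.length + 1) (fun _ => false) st s else st) ((PySem.Set.empty : PySem.Set Int), ([] : List (List Int × Bool))))).2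
      = (order.foldl (pvStepB rev (sel.length + 1) (pvFlagAdj nb))
          ((order.filter (fun e => decide ((live0.getD e []).length ≤ 1))).foldl (pvStepB rev (sel.length + 1) (fun _ => false)) ((alive0, live0), ([] : List (List Int × Bool))))).2
  rw [PySem.List.foldl_ite_eq_foldl_filter (p := fun s : Int => ((live0.getD s []).length : Int) ≤ 1)]
  rw [hends']
  obtain ⟨hres1, hInv1⟩ := fold_sim order live0 rev hrev hadj (sel.length + 1)
    (fun _ => false) (fun _ => false) (fun _ _ _ => rfl)
    (order.filter (fun e => decide ((live0.getD e []).length ≤ 1)))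
    (fun s hs => (List.mem_filter.mp hs).1)
    PySem.Set.empty alive0 live0 [] hInv0
  set FS1 := (order.filter (fun e => decide ((live0.getD e []).length ≤ 1))).foldl (pvStepS live0 (sel.length + 1) (fun _ => false)) ((PySem.Set.empty : PySem.Set Int), ([] : List (List Int × Bool))) with hFS1def
  set FB1 := (order.filter (fun e => decide ((live0.getD e []).length ≤ 1))).foldl (pvStepB rev (sel.length + 1) (fun _ => false)) ((alive0, live0), ([] : List (List Int × Bool))) with hFB1def
  obtain ⟨hres2, _⟩ := fold_sim order live0 rev hrev hadj (sel.length + 1)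
    (pvFlagAdj live0) (pvFlagAdj nb) hflag2 order (fun s hs => hs)
    FS1.1 FB1.1.1 FB1.1.2 FB1.2 hInv1
  have hFS1e : FS1 = (FS1.1, FB1.2) := by rw [← hres1]
  rw [hFS1e]
  exact hres2


-- ===== VERDICT (by name: the statement is the Claim_ definition above) =====
theorem order_selected_into_sequences_py_spec : Claim_equal_order_selected_into_sequences_py := by
  intro neighbors selected_indices _
  unfold Spec_order_selected_into_sequences_py
  rw [a_eq_abs, abs_eq_alt]
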